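-- pv_equiv track=rewrite | github.com/HLT-HITSZ/TransECPE | Utils/Evaluation.py | merge_tuple_single
-- ===== SOURCE A (Python) =====
-- def merge_tuple_single(single_preds, tuple_preds, document_list):
--     dls = [len(x.split('\x01')) for x in document_list]
--     start = 0
--     convert_single_label = []
--     for dl in dls:
--         end = start + dl
--         sp = single_preds[start: end]
--         convert_single_label.append([(i, i) for i in range(dl) if sp[i] == 1])
--         start = end
--     merge_label_list = [tuple_preds[i] + convert_single_label[i] for i in range(len(dls))]
--     return merge_label_list
-- ===== SOURCE B (Python) =====
-- def _locate(starts, g):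
--     # last index d with starts[d] <= g (starts strictly increasing, starts[0] == 0 <= g)
--     lo, hi = 0, len(starts)
--     while lo + 1 < hi:
--         mid = (lo + hi) // 2
--         if starts[mid] <= g:
--             lo = mid
--         else:
--             hi = mid
--     return lo
--
--
-- def merge_tuple_single(single_preds, tuple_preds, document_list):
--     starts = []
--     total = 0
--     for doc in document_list:
--         starts.append(total)
--         total += len(doc.split('\x01'))
--     buckets = [[] for _ in document_list]
--     for g in range(total):
--         if single_preds[g] == 1:
--             d = _locate(starts, g)
--             buckets[d].append((g - starts[d], g - starts[d]))
--     return [tuple_preds[d] + buckets[d] for d in range(len(document_list))]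
-- ===== Notes on version B (the rewrite author's own statement) =====
-- stated objective: alternative
-- what changed: B inverts the loop structure: instead of A's per-document slicing of single_preds with an inner index scan, B precomputes the documents' start offsets, makes one global pass over all positions and binary-searches each position predicted 1 into its document's bucket, then concatenates tuple_preds with the buckets.
import Mathlib
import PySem

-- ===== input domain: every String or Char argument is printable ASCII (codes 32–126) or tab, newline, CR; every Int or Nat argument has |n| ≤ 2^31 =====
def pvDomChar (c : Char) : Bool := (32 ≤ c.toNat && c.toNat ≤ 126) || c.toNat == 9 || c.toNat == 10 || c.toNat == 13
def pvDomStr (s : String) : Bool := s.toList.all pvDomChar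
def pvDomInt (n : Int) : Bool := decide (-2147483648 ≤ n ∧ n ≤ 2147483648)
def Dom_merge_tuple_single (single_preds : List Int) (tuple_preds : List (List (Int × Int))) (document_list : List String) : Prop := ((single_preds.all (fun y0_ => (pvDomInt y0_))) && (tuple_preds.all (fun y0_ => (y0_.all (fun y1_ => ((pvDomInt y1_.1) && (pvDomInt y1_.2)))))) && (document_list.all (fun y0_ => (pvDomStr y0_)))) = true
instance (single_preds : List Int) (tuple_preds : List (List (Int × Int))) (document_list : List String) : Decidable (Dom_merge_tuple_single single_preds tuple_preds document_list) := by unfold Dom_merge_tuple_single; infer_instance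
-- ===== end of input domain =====

-- B inverts A's loop structure: it precomputes the documents' start offsets, makes one global
-- pass over all positions binary-searching each position predicted 1 into its document's
-- bucket, then concatenates tuple_preds with the buckets (objective: alternative).

-- ===== PORT A =====
def merge_tuple_single (single_preds : List Int) (tuple_preds : List (List (Int × Int))) (document_list : List String) : List (List (Int × Int)) :=
  let dls : List Int := document_list.map (fun x => (((PySem.Str.split? x "\x01").getD []).length : Int))
  let st := dls.foldl (fun (acc : Int × List (List (Int × Int))) dl =>
      let start := acc.1
      let e := start + dl
      let sp := PySem.List.slice single_preds (some start) (some e)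
      (e, acc.2 ++ [((PySem.List.pyRange 0 dl 1).filter
            (fun i => PySem.List.pyGetD sp i 0 == 1)).map (fun i => (i, i))]))
    ((0 : Int), ([] : List (List (Int × Int))))
  (PySem.List.pyRange 0 ((dls.length : Int)) 1).map (fun i =>
      PySem.List.pyGetD tuple_preds i [] ++ PySem.List.pyGetD st.2 i [])

-- ===== PORT B =====
-- binary search: last index lo with starts[lo] <= g (always called with the index in range;
-- the fuel argument only makes the while loop total: starts.length steps always suffice)
def pvLocateGo (starts : List Int) (g : Int) : Nat → Int → Int → Int
  | 0, lo, _ => lo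
  | fuel + 1, lo, hi =>
      if lo + 1 < hi then
        if PySem.List.pyGetD starts (PySem.Int.floordiv (lo + hi) 2) 0 ≤ g then
          pvLocateGo starts g fuel (PySem.Int.floordiv (lo + hi) 2) hi
        else
          pvLocateGo starts g fuel lo (PySem.Int.floordiv (lo + hi) 2)
      else lo

def pvLocate (starts : List Int) (g : Int) : Int :=
  pvLocateGo starts g starts.length 0 (starts.length : Int)

def merge_tuple_single_alt (single_preds : List Int) (tuple_preds : List (List (Int × Int))) (document_list : List String) : List (List (Int × Int)) :=
  let st := document_list.foldl
    (fun (acc : List Int × Int) doc =>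
      (acc.1 ++ [acc.2], acc.2 + (((PySem.Str.split? doc "\x01").getD []).length : Int)))
    (([] : List Int), (0 : Int))
  let starts := st.1
  let total := st.2
  let buckets := (PySem.List.pyRange 0 total 1).foldl
    (fun (bk : List (List (Int × Int))) g =>
      if PySem.List.pyGetD single_preds g 0 == 1 then
        let d := pvLocate starts g
        PySem.List.pySetD bk d
          (PySem.List.pyGetD bk d [] ++
            [(g - PySem.List.pyGetD starts d 0, g - PySem.List.pyGetD starts d 0)])
      else bk)
    (document_list.map (fun _ => ([] : List (Int × Int))))
  (PySem.List.pyRange 0 ((document_list.length : Nat) : Int) 1).map (fun d =>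
      PySem.List.pyGetD tuple_preds d [] ++ PySem.List.pyGetD buckets d [])

-- ===== PRECONDITION & SPEC =====
-- Pre_ excludes exactly the inputs on which A raises IndexError: single_preds shorter than the
-- total document length, or tuple_preds shorter than document_list (B raises there as well).
def Pre_merge_tuple_single (single_preds : List Int) (tuple_preds : List (List (Int × Int))) (document_list : List String) : Prop :=
  (document_list.map (fun x => ((PySem.Str.split? x "\x01").getD []).length)).sum ≤ single_preds.length ∧
  document_list.length ≤ tuple_preds.length
instance (single_preds : List Int) (tuple_preds : List (List (Int × Int))) (document_list : List String) : Decidable (Pre_merge_tuple_single single_preds tuple_preds document_list) := by unfold Pre_merge_tuple_single; infer_instance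
def pvWitness_merge_tuple_single : List Int × (List (List (Int × Int))) × List String := ([1], [[(0, 0)]], ["a"])

def Spec_merge_tuple_single (single_preds : List Int) (tuple_preds : List (List (Int × Int))) (document_list : List String) (out : List (List (Int × Int))) : Prop := out = merge_tuple_single_alt single_preds tuple_preds document_list
instance (single_preds : List Int) (tuple_preds : List (List (Int × Int))) (document_list : List String) (out : List (List (Int × Int))) : Decidable (Spec_merge_tuple_single single_preds tuple_preds document_list out) := by unfold Spec_merge_tuple_single; infer_instance

-- ===== CLAIM (what is proved, stated in full; the proofs are below) =====
def Claim_equal_merge_tuple_single : Prop := ∀ (single_preds : List Int) (tuple_preds : List (List (Int × Int))) (document_list : List String), Dom_merge_tuple_single single_preds tuple_preds document_list → Pre_merge_tuple_single single_preds tuple_preds document_list → Spec_merge_tuple_single single_preds tuple_preds document_list (merge_tuple_single single_preds tuple_preds document_list)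

-- ===== LEMMAS AND PROOFS =====

-- document length as both ports compute it, and its sum
def pvDl (x : String) : Nat := ((PySem.Str.split? x "\x01").getD []).length
def pvSum (docs : List String) : Nat := (docs.map pvDl).sum

-- a split on a nonempty separator has at least one piece
theorem pvGoLen (sep : List Char) : ∀ (fuel : Nat) (l cur : List Char) (acc : List (List Char)),
    acc.length < (PySem.Chars.splitOn.go sep fuel l cur acc).length := by
  intro fuel
  induction fuel with
  | zero => intro l cur acc; simp [PySem.Chars.splitOn.go]
  | succ n ih =>
      intro l cur acc
      cases l with
      | nil => simp [PySem.Chars.splitOn.go]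
      | cons c rest =>
          simp only [PySem.Chars.splitOn.go]
          split
          · exact lt_trans (by simp) (ih (List.drop sep.length (c :: rest)) [] (cur.reverse :: acc))
          · exact ih rest (c :: cur) acc

theorem pvDl_pos (x : String) : 1 ≤ pvDl x := by
  have h := pvGoLen ['\x01'] (x.toList.length + 1) x.toList [] []
  simp only [pvDl, PySem.Str.split?, PySem.Chars.split?, PySem.Chars.splitOn]
  rw [show ("\x01".toList) = ['\x01'] from by decide]
  simp only [List.isEmpty_cons, Bool.false_eq_true, if_false, Option.map_some, Option.getD_some,
    List.length_map]
  omega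

-- the document start offsets, recursively
def pvStarts : List String → Int → List Int
  | [], _ => []
  | x :: xs, st => st :: pvStarts xs (st + (pvDl x : Int))

-- one document's labels, with absolute offset st into single_preds
def pvLab (sp : List Int) (st : Int) (n : Nat) : List (Int × Int) :=
  ((PySem.List.pyRange 0 (n : Int) 1).filter (fun i => PySem.List.pyGetD sp (st + i) 0 == 1)).map
    (fun i => (i, i))

-- all documents' label buckets
def pvBk (sp : List Int) : List String → Nat → List (List (Int × Int))
  | [], _ => []
  | x :: xs, st => pvLab sp (st : Int) (pvDl x) :: pvBk sp xs (st + pvDl x)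

-- ---- A side ----

-- A's per-document label list, recursively over the documents (slice-based, as A computes it)
def pvConvA (sp : List Int) : List String → Int → List (List (Int × Int))
  | [], _ => []
  | x :: xs, st =>
      ((PySem.List.pyRange 0 ((pvDl x : Nat) : Int) 1).filter
          (fun i => PySem.List.pyGetD (PySem.List.slice sp (some st) (some (st + ((pvDl x : Nat) : Int)))) i 0 == 1)).map
        (fun i => (i, i)) :: pvConvA sp xs (st + ((pvDl x : Nat) : Int))

theorem pvFoldA (sp : List Int) (docs : List String) : ∀ (st : Int) (acc : List (List (Int × Int))),
    (docs.map (fun x => (((PySem.Str.split? x "\x01").getD []).length : Int))).foldl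
      (fun (acc : Int × List (List (Int × Int))) dl =>
        (acc.1 + dl, acc.2 ++ [((PySem.List.pyRange 0 dl 1).filter
            (fun i => PySem.List.pyGetD (PySem.List.slice sp (some acc.1) (some (acc.1 + dl))) i 0 == 1)).map (fun i => (i, i))]))
      (st, acc)
    = (st + (pvSum docs : Int), acc ++ pvConvA sp docs st) := by
  induction docs with
  | nil => intro st acc; simp [pvSum, pvConvA]
  | cons x xs ih =>
      intro st acc
      simp only [List.map_cons, List.foldl_cons, ih, pvConvA, pvSum, List.sum_cons]
      simp only [Prod.mk.injEq]
      constructor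
      · show st + (pvDl x : Int) + _ = _
        push_cast; ring
      · show acc ++ [_] ++ pvConvA sp xs (st + (pvDl x : Int)) = _
        simp [pvDl]

-- on a fully in-range chunk, A's slice-based labels are the absolute-offset labels
theorem pvConvA_eq_bk (sp : List Int) : ∀ (docs : List String) (st : Nat),
    st + pvSum docs ≤ sp.length →
    pvConvA sp docs ((st : Nat) : Int) = pvBk sp docs st := by
  intro docs
  induction docs with
  | nil => intro st _; rfl
  | cons x xs ih =>
      intro st hle
      have hsum : pvDl x + pvSum xs = pvSum (x :: xs) := by simp [pvSum]
      have hlen : st + pvDl x ≤ sp.length := by omega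
      simp only [pvConvA, pvBk]
      congr 1
      · -- the head: rewrite the slice access into an absolute access
        simp only [pvLab]
        apply congrArg
        apply List.filter_congr
        intro i hi
        rw [PySem.List.mem_pyRange_one] at hi
        rw [PySem.List.slice_natCast_add]
        have h0 : (0:Int) ≤ i := hi.1
        have hlt : i < (pvDl x : Int) := hi.2
        have hiN : i.toNat < pvDl x := by omega
        have h1 : PySem.List.pyGetD ((sp.drop st).take (pvDl x)) i 0 = sp[st + i.toNat]'(by omega) := by
          rw [PySem.List.pyGetD_eq_getElem _ _ h0 (by simp; omega)]
          rw [List.getElem_take, List.getElem_drop]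
        have h2 : PySem.List.pyGetD sp ((st : Int) + i) 0 = sp[st + i.toNat]'(by omega) := by
          rw [PySem.List.pyGetD_eq_getElem _ _ (by omega) (by omega)]
          congr 1
          omega
        rw [h1, h2]
      · have := ih (st + pvDl x) (by omega)
        rw [show ((st + pvDl x : Nat) : Int) = ((st : Nat) : Int) + ((pvDl x : Nat) : Int) from
          by push_cast; ring] at this
        exact this

-- ---- B side ----

theorem pvFoldStarts (docs : List String) : ∀ (st : Int) (acc : List Int),
    docs.foldl
      (fun (acc : List Int × Int) doc =>
        (acc.1 ++ [acc.2], acc.2 + (((PySem.Str.split? doc "\x01").getD []).length : Int)))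
      (acc, st)
    = (acc ++ pvStarts docs st, st + (pvSum docs : Int)) := by
  induction docs with
  | nil => intro st acc; simp [pvStarts, pvSum]
  | cons x xs ih =>
      intro st acc
      simp only [List.foldl_cons, ih, pvStarts, pvSum, List.map_cons, List.sum_cons]
      simp only [Prod.mk.injEq]
      constructor
      · simp [pvDl]
      · show st + (pvDl x : Int) + _ = _
        push_cast; ring

theorem pvStarts_length (docs : List String) : ∀ st, (pvStarts docs st).length = docs.length := by
  induction docs with
  | nil => intro st; rfl
  | cons x xs ih => intro st; simp [pvStarts, ih]

theorem pvStarts_getD (docs : List String) : ∀ (st : Int) (k : Nat), k < docs.length →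
    (pvStarts docs st).getD k 0 = st + (pvSum (docs.take k) : Int) := by
  induction docs with
  | nil => intro st k h; simp at h
  | cons x xs ih =>
      intro st k hk
      cases k with
      | zero => simp [pvStarts, pvSum]
      | succ k' =>
          simp only [pvStarts, List.getD_cons_succ, List.take_succ_cons]
          rw [ih (st + (pvDl x : Int)) k' (by simpa using hk)]
          simp only [pvSum, List.map_cons, List.sum_cons]
          push_cast
          ring

theorem pvStarts_lb (docs : List String) : ∀ (st : Int) (y : Int), y ∈ pvStarts docs st → st ≤ y := by
  induction docs with
  | nil => intro st y h; simp [pvStarts] at h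
  | cons x xs ih =>
      intro st y h
      simp only [pvStarts, List.mem_cons] at h
      rcases h with h | h
      · omega
      · have := ih (st + (pvDl x : Int)) y h
        have := pvDl_pos x
        omega

theorem pvStarts_pairwise (docs : List String) : ∀ st, (pvStarts docs st).Pairwise (· < ·) := by
  induction docs with
  | nil => intro st; simp [pvStarts]
  | cons x xs ih =>
      intro st
      simp only [pvStarts, List.pairwise_cons]
      refine ⟨?_, ih _⟩
      intro y hy
      have := pvStarts_lb xs (st + (pvDl x : Int)) y hy
      have := pvDl_pos x
      omega

-- monotone access of a strictly increasing list
theorem pvMonoGetD (S : List Int) (hS : S.Pairwise (· < ·)) (i j : Nat) (hij : i ≤ j)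
    (hj : j < S.length) : S.getD i 0 ≤ S.getD j 0 := by
  rcases Nat.lt_or_ge i j with h | h
  · rw [List.getD_eq_getElem _ _ (by omega), List.getD_eq_getElem _ _ hj]
    exact le_of_lt ((List.pairwise_iff_getElem.mp hS) i j (by omega) hj h)
  · have : i = j := by omega
    subst this; rfl

-- binary-search correctness
theorem pvLocateGo_eq (S : List Int) (g : Int) (hS : S.Pairwise (· < ·)) (d : Nat)
    (hd : d < S.length) (h1 : S.getD d 0 ≤ g)
    (h2 : d + 1 = S.length ∨ g < S.getD (d + 1) 0) :
    ∀ (k : Nat) (lo hi : Int), (hi - lo).toNat ≤ k → 0 ≤ lo → lo ≤ (d : Int) →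
      (d : Int) < hi → hi ≤ (S.length : Int) → pvLocateGo S g k lo hi = (d : Int) := by
  intro k
  induction k with
  | zero => intro lo hi hk _ hlo hhi _; omega
  | succ n ih =>
      intro lo hi hk h0 hlo hhi hlen
      simp only [pvLocateGo]
      split
      · next hcond =>
        have hm : PySem.Int.floordiv (lo + hi) 2 = (lo + hi) / 2 :=
          PySem.Int.floordiv_eq_ediv_of_pos (by norm_num)
        set mid : Int := PySem.Int.floordiv (lo + hi) 2 with hmid
        have hb1 : lo < mid := by omega
        have hb2 : mid < hi := by omega
        have hmN : mid.toNat < S.length := by omega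
        have hmEq : PySem.List.pyGetD S mid 0 = S.getD mid.toNat 0 := by
          rw [PySem.List.pyGetD_eq_getElem _ _ (by omega) (by omega)]
          rw [List.getD_eq_getElem _ _ hmN]
        split
        · next hle =>
          -- starts[mid] <= g: mid <= d
          have hmd : mid ≤ (d : Int) := by
            by_contra hgt
            push_neg at hgt
            have hd1 : d + 1 ≤ mid.toNat := by omega
            have hd1' : d + 1 < S.length := by omega
            rcases h2 with h2 | h2
            · omega
            · have := pvMonoGetD S hS (d + 1) mid.toNat hd1 hmN
              rw [hmEq] at hle
              omega
          exact ih mid hi (by omega) (by omega) hmd hhi hlen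
        · next hgt =>
          -- g < starts[mid]: d < mid
          have hdm : (d : Int) < mid := by
            by_contra hle'
            push_neg at hle'
            have := pvMonoGetD S hS mid.toNat d (by omega) hd
            rw [hmEq] at hgt
            omega
          exact ih lo mid (by omega) h0 hlo hdm (by omega)
      · next hcond =>
        omega

theorem pvLocate_eq (S : List Int) (g : Int) (hS : S.Pairwise (· < ·)) (d : Nat)
    (hd : d < S.length) (h1 : S.getD d 0 ≤ g)
    (h2 : d + 1 = S.length ∨ g < S.getD (d + 1) 0) : pvLocate S g = (d : Int) := by
  unfold pvLocate
  exact pvLocateGo_eq S g hS d hd h1 h2 S.length 0 (S.length : Int)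
    (by omega) (le_refl _) (by omega) (by omega) (le_refl _)

-- a list's element set back unchanged
theorem pvSetGetD {α : Type} (l : List α) (d : Nat) (x : α) (h : d < l.length) :
    l.set d (l.getD d x) = l := by
  rw [List.getD_eq_getElem l x h]
  exact List.set_getElem_self h

theorem pvGetDSet {α : Type} (l : List α) (d : Nat) (v x : α) (h : d < l.length) :
    (l.set d v).getD d x = v := by
  rw [List.getD_eq_getElem _ x (by simpa using h)]
  simp

-- one document's segment of the global pass appends exactly that document's labels
theorem pvSeg (sp S : List Int) (d : Nat) (st : Nat)
    (hS : PySem.List.pyGetD S ((d : Nat) : Int) 0 = ((st : Nat) : Int)) :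
    ∀ (n : Nat) (bk : List (List (Int × Int))), d < bk.length →
    (∀ g : Int, (st : Int) ≤ g → g < (st : Int) + (n : Int) → pvLocate S g = (d : Int)) →
    (PySem.List.pyRange (st : Int) ((st : Int) + (n : Int)) 1).foldl
      (fun (bk : List (List (Int × Int))) g =>
        if PySem.List.pyGetD sp g 0 == 1 then
          PySem.List.pySetD bk (pvLocate S g)
            (PySem.List.pyGetD bk (pvLocate S g) [] ++
              [(g - PySem.List.pyGetD S (pvLocate S g) 0, g - PySem.List.pyGetD S (pvLocate S g) 0)])
        else bk) bk
    = bk.set d (bk.getD d [] ++ pvLab sp (st : Int) n) := by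
  intro n
  induction n with
  | zero =>
      intro bk hd _
      rw [show ((st : Int) + ((0 : Nat) : Int)) = (st : Int) by push_cast; ring]
      rw [PySem.List.pyRange_one_eq_nil (le_refl _)]
      simp only [List.foldl_nil, pvLab]
      rw [show ((0 : Nat) : Int) = (0 : Int) by norm_num]
      rw [PySem.List.pyRange_one_eq_nil (le_refl _)]
      simp only [List.filter_nil, List.map_nil, List.append_nil]
      exact (pvSetGetD bk d [] hd).symm
  | succ n ih =>
      intro bk hd hloc
      have hsplit : PySem.List.pyRange (st : Int) ((st : Int) + ((n + 1 : Nat) : Int)) 1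
          = PySem.List.pyRange (st : Int) ((st : Int) + (n : Int)) 1 ++ [(st : Int) + (n : Int)] := by
        have : ((st : Int) + ((n + 1 : Nat) : Int)) = ((st : Int) + (n : Int)) + 1 := by push_cast; ring
        rw [this, PySem.List.pyRange_one_succ_right (by omega)]
      rw [hsplit, List.foldl_append]
      rw [ih bk hd (fun g hg1 hg2 => hloc g hg1 (by push_cast at hg2 ⊢; omega))]
      simp only [List.foldl_cons, List.foldl_nil]
      have hlocn : pvLocate S ((st : Int) + (n : Int)) = (d : Int) :=
        hloc _ (by omega) (by push_cast; omega)
      have hlab : pvLab sp (st : Int) (n + 1)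
          = pvLab sp (st : Int) n ++
            (if PySem.List.pyGetD sp ((st : Int) + (n : Int)) 0 == 1
             then [((n : Int), (n : Int))] else []) := by
        simp only [pvLab]
        have : ((n + 1 : Nat) : Int) = (n : Int) + 1 := by push_cast; ring
        rw [this, PySem.List.pyRange_one_succ_right (by omega)]
        rw [List.filter_append, List.map_append]
        congr 1
        simp only [List.filter_cons, List.filter_nil]
        split
        · simp
        · simp
      rw [hlab]
      split
      · next hcond =>
        rw [hlocn, hS]
        have harg : (st : Int) + (n : Int) - (st : Int) = (n : Int) := by ring
        rw [harg]
        rw [PySem.List.pySetD_natCast, PySem.List.pyGetD_natCast]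
        rw [pvGetDSet _ _ _ _ (by simpa using hd)]
        rw [List.set_set]
        simp [List.append_assoc]
      · next _hcond =>
        simp

-- sums over appended document lists
theorem pvSum_append (l1 l2 : List String) : pvSum (l1 ++ l2) = pvSum l1 + pvSum l2 := by
  simp [pvSum]

-- the global pass over all positions produces exactly the per-document buckets
theorem pvMain (sp : List Int) (docs : List String) :
    ∀ (xs : List String) (d0 : Nat) (done : List (List (Int × Int))),
    done.length = d0 → d0 ≤ docs.length → docs.drop d0 = xs →
    (PySem.List.pyRange ((pvSum (docs.take d0) : Nat) : Int) ((pvSum docs : Nat) : Int) 1).foldl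
      (fun (bk : List (List (Int × Int))) g =>
        if PySem.List.pyGetD sp g 0 == 1 then
          PySem.List.pySetD bk (pvLocate (pvStarts docs 0) g)
            (PySem.List.pyGetD bk (pvLocate (pvStarts docs 0) g) [] ++
              [(g - PySem.List.pyGetD (pvStarts docs 0) (pvLocate (pvStarts docs 0) g) 0,
                g - PySem.List.pyGetD (pvStarts docs 0) (pvLocate (pvStarts docs 0) g) 0)])
        else bk) (done ++ List.replicate xs.length [])
    = done ++ pvBk sp xs (pvSum (docs.take d0)) := by
  intro xs
  induction xs with
  | nil =>
      intro d0 done hlen hd0 hdrop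
      have htake : docs.take d0 = docs := by
        have := List.take_append_drop d0 docs
        rw [hdrop] at this
        simpa using this
      rw [htake, PySem.List.pyRange_one_eq_nil (le_refl _)]
      simp [pvBk]
  | cons x xs' ih =>
      intro d0 done hlen hd0 hdrop
      have hd0lt : d0 < docs.length := by
        by_contra h
        push_neg at h
        rw [List.drop_eq_nil_of_le h] at hdrop
        simp at hdrop
      have hget : docs[d0]'hd0lt = x := by
        have : (docs.drop d0)[0]'(by rw [hdrop]; simp) = x := by
          simp [hdrop]
        rw [List.getElem_drop] at this
        simpa using this
      have htake1 : docs.take (d0 + 1) = docs.take d0 ++ [x] := by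
        rw [List.take_succ]
        congr 1
        rw [List.getElem?_eq_getElem hd0lt, hget]
        rfl
      have hdrop1 : docs.drop (d0 + 1) = xs' := by
        have h := congrArg (List.drop 1) hdrop
        simpa [List.drop_drop, Nat.add_comm] using h
      have hsum1 : pvSum (docs.take (d0 + 1)) = pvSum (docs.take d0) + pvDl x := by
        rw [htake1, pvSum_append]; simp [pvSum]
      have hsumle : pvSum (docs.take (d0 + 1)) ≤ pvSum docs := by
        conv_rhs => rw [← List.take_append_drop (d0 + 1) docs]
        rw [pvSum_append]
        omega
      -- split the range at the next document boundary
      have hsplit : PySem.List.pyRange ((pvSum (docs.take d0) : Nat) : Int) ((pvSum docs : Nat) : Int) 1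
          = PySem.List.pyRange ((pvSum (docs.take d0) : Nat) : Int) ((pvSum (docs.take (d0 + 1)) : Nat) : Int) 1
            ++ PySem.List.pyRange ((pvSum (docs.take (d0 + 1)) : Nat) : Int) ((pvSum docs : Nat) : Int) 1 := by
        exact PySem.List.pyRange_one_append _ ((pvSum (docs.take (d0 + 1)) : Nat) : Int) _
          (by push_cast; omega) (by push_cast; omega)
      rw [hsplit, List.foldl_append]
      -- the first segment: apply pvSeg with document index d0
      have hSlen : (pvStarts docs 0).length = docs.length := pvStarts_length docs 0
      have hSd : PySem.List.pyGetD (pvStarts docs 0) ((d0 : Nat) : Int) 0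
          = ((pvSum (docs.take d0) : Nat) : Int) := by
        rw [PySem.List.pyGetD_natCast]
        rw [pvStarts_getD docs 0 d0 hd0lt]
        push_cast; ring
      have hloc : ∀ g : Int, ((pvSum (docs.take d0) : Nat) : Int) ≤ g →
          g < ((pvSum (docs.take d0) : Nat) : Int) + ((pvDl x : Nat) : Int) →
          pvLocate (pvStarts docs 0) g = (d0 : Int) := by
        intro g hg1 hg2
        apply pvLocate_eq (pvStarts docs 0) g (pvStarts_pairwise docs 0) d0 (by omega)
        · rw [pvStarts_getD docs 0 d0 hd0lt]
          push_cast at hg1 ⊢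
          omega
        · rcases Nat.lt_or_ge (d0 + 1) docs.length with h | h
          · right
            rw [pvStarts_getD docs 0 (d0 + 1) h, hsum1]
            push_cast at hg2 ⊢
            omega
          · left
            omega
      have hbklen : d0 < (done ++ List.replicate (x :: xs').length ([] : List (Int × Int))).length := by
        simp [hlen]
      have hseg := pvSeg sp (pvStarts docs 0) d0 (pvSum (docs.take d0)) hSd (pvDl x)
        (done ++ List.replicate (x :: xs').length []) hbklen hloc
      rw [show ((pvSum (docs.take (d0+1)) : Nat) : Int)
            = ((pvSum (docs.take d0) : Nat) : Int) + ((pvDl x : Nat) : Int) by rw [hsum1]; push_cast; ring]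
      rw [hseg]
      -- simplify the state after the first segment
      have hgetD : (done ++ List.replicate (x :: xs').length ([] : List (Int × Int))).getD d0 [] = [] := by
        rw [List.getD_eq_getElem _ _ hbklen]
        rw [List.getElem_append_right (by omega)]
        simp [hlen]
      have hset : (done ++ List.replicate (x :: xs').length ([] : List (Int × Int))).set d0
            ([] ++ pvLab sp ((pvSum (docs.take d0) : Nat) : Int) (pvDl x))
          = (done ++ [pvLab sp ((pvSum (docs.take d0) : Nat) : Int) (pvDl x)]) ++ List.replicate xs'.length [] := by
        rw [List.set_append]
        split
        · omega
        · rw [hlen]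
          simp only [Nat.sub_self, List.length_cons, List.nil_append]
          rw [show List.replicate (xs'.length + 1) ([] : List (Int × Int)) = [] :: List.replicate xs'.length [] from rfl]
          simp [List.append_assoc]
      rw [hgetD, hset]
      -- the remaining segments: induction hypothesis at d0 + 1
      have := ih (d0 + 1) (done ++ [pvLab sp ((pvSum (docs.take d0) : Nat) : Int) (pvDl x)])
        (by simp [hlen]) (by omega) hdrop1
      rw [show ((pvSum (docs.take (d0 + 1)) : Nat) : Int)
            = ((pvSum (docs.take d0) : Nat) : Int) + ((pvDl x : Nat) : Int) from
          by rw [hsum1]; push_cast; ring, hsum1] at this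
      rw [this]
      simp only [List.append_assoc, List.singleton_append, pvBk]
  
-- ===== VERDICT (by name: the statement is the Claim_ definition above) =====
theorem merge_tuple_single_spec : Claim_equal_merge_tuple_single := by
  intro sp tp docs _ hpre
  unfold Spec_merge_tuple_single merge_tuple_single merge_tuple_single_alt
  dsimp only
  rw [pvFoldStarts docs 0 []]
  dsimp only
  simp only [List.nil_append]
  rw [pvFoldA sp docs 0 []]
  dsimp only
  rw [List.nil_append]
  have hrepl : docs.map (fun _ => ([] : List (Int × Int))) = List.replicate docs.length [] := by
    simp [List.map_const']
  have hmain := pvMain sp docs docs 0 [] rfl (by omega) (by simp)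
  simp only [List.take_zero, List.nil_append] at hmain
  rw [show (0 : Int) + ((pvSum docs : Nat) : Int) = ((pvSum docs : Nat) : Int) by ring]
  rw [show pvSum ([] : List String) = 0 from rfl] at hmain
  rw [show ((0 : Nat) : Int) = (0 : Int) from rfl] at hmain
  rw [hrepl, hmain]
  have hconv : pvConvA sp docs 0 = pvBk sp docs 0 := by
    have := pvConvA_eq_bk sp docs 0 (by simpa [pvSum, pvDl] using hpre.1)
    simpa using this
  rw [hconv]
  simp [List.length_map]
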